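-- pv_equiv track=rewrite | github.com/ninjha01/advent2021 | fourteen/day14.py | part_one
-- ===== SOURCE A (Python) =====
-- from collections import defaultdict
-- from typing import Dict, FrozenSet, List, Literal, Set, Tuple, Callable, Optional, Union
--
-- def break_into_chunks(in_str: str) -> List[str]:
--     chunks = []
--     for i in range(len(in_str) - 1):
--         chunks.append(in_str[i : i + 2])
--     return chunks
--
-- def merge_chunks_into_string(chunks: List[str]) -> str:
--     reconstituted = [x[:-1] for x in chunks] + [chunks[-1][-1]]
--     return "".join(reconstituted)
--
-- def part_one(puzzle: Tuple[str, Dict[str, str]]) -> int: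
--     start_str, rules = puzzle
--     for _ in range(0, 10):
--         chunks = break_into_chunks(start_str)
--         new_chunks: List[str] = []
--         for chunk in chunks:
--             insertion = rules.get(chunk, None)
--             if insertion is not None:
--                 new_chunks.append("".join([chunk[0], insertion, chunk[1]]))
--             else:
--                 new_chunks.append(chunk)
--         new_str = merge_chunks_into_string(new_chunks)
--         start_str = new_str
--     count_dict = defaultdict(lambda: 0)
--     for char in start_str:
--         count_dict[char] += 1
--     most_common = max(count_dict.values())
--     least_common = min(count_dict.values())
--     return most_common - least_common
-- ===== SOURCE B (Python) =====
-- def part_one(puzzle):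
--     start, rules = puzzle
--     pc = {}
--     for q in zip(start, start[1:]):
--         pc[q] = pc.get(q, 0) + 1
--     for _ in range(10):
--         npc = {}
--         for (a, b), n in pc.items():
--             ins = rules.get(a + b)
--             mid = a + ins + b if ins is not None else a + b
--             for q in zip(mid, mid[1:]):
--                 npc[q] = npc.get(q, 0) + n
--         pc = npc
--     cc = {}
--     for (a, _), n in pc.items():
--         cc[a] = cc.get(a, 0) + n
--     last = start[-1]
--     cc[last] = cc.get(last, 0) + 1
--     vals = cc.values()
--     return max(vals) - min(vals)
-- ===== Notes on version B (the rewrite author's own statement) =====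
-- stated objective: faster
-- what changed: Instead of materialising the polymer string through 10 rounds of chunk-split/insert/merge (final string ~ L*2^10 chars), B keeps a dictionary counting adjacent pairs, applies the insertion rules to the counts for 10 rounds, and derives the character counts from the final pair counts plus the invariant last character.
import Mathlib
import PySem

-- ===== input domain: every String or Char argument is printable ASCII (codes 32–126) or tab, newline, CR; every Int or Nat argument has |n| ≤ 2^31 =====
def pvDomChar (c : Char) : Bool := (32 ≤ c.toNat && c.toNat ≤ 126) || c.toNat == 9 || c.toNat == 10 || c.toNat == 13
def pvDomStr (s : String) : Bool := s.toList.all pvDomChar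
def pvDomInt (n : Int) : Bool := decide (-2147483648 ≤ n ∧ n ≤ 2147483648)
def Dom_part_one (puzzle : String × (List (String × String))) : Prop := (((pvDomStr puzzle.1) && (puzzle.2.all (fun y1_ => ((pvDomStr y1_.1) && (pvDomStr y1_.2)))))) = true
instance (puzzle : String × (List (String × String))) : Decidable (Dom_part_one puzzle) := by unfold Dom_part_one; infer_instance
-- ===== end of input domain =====

-- B replaces A's 10 rounds of literal string expansion (string length ≈ L·2^10) by a dictionary of
-- adjacent-pair counts updated by the rules, deriving the character counts from the final pair counts;
-- objective: faster (the measured speed-up is a large constant factor at fixed 10 steps).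

-- ===== PORT A =====
-- break_into_chunks: chunks.append(in_str[i : i + 2]) for i in range(len(in_str) - 1)
def pvBreakIntoChunks (s : List Char) : List (List Char) :=
  (PySem.List.pyRange 0 ((s.length : Int) - 1) 1).foldl
    (fun chunks i => chunks ++ [PySem.List.slice s (some i) (some (i + 2))]) []

-- merge_chunks_into_string: "".join([x[:-1] for x in chunks] + [chunks[-1][-1]]);
-- the two pyGetD are exact under Pre_ (chunks and its last chunk are nonempty there;
-- on an empty chunk list Python raises IndexError, excluded by Pre_)
def pvMergeChunks (chunks : List (List Char)) : List Char :=
  ((chunks.map (fun x => PySem.List.slice x none (some (-1))))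
    ++ [[PySem.List.pyGetD (PySem.List.pyGetD chunks (-1) []) (-1) ' ']]).flatten

def part_one (puzzle : String × (List (String × String))) : Int :=
  let rules : PySem.Dict (List Char) (List Char) :=
    PySem.Dict.mk (puzzle.2.map (fun p => (p.1.toList, p.2.toList)))
  let final := (PySem.List.pyRange 0 10 1).foldl (fun start_str _ =>
      let chunks := pvBreakIntoChunks start_str
      let newChunks := chunks.foldl (fun acc chunk =>
        match rules.get? chunk with
        | some ins => acc ++ [[PySem.List.pyGetD chunk 0 ' '] ++ ins ++ [PySem.List.pyGetD chunk 1 ' ']]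
        | none => acc ++ [chunk]) ([] : List (List Char))
      pvMergeChunks newChunks) puzzle.1.toList
  let countDict := final.foldl (fun d ch => d.modify ch 0 (· + 1)) (PySem.Dict.empty : PySem.Dict Char Int)
  -- max/min of the nonempty values list (nonempty under Pre_; Python raises ValueError on empty)
  ((PySem.List.max? countDict.values (fun x => x)).getD 0)
    - ((PySem.List.min? countDict.values (fun x => x)).getD 0)

-- ===== PORT B =====
def part_one_alt (puzzle : String × (List (String × String))) : Int :=
  let s := puzzle.1.toList
  let rules : PySem.Dict (List Char) (List Char) :=
    PySem.Dict.mk (puzzle.2.map (fun p => (p.1.toList, p.2.toList)))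
  -- pair counter of the start string: for q in zip(start, start[1:]): pc[q] = pc.get(q, 0) + 1
  let pc0 := (s.zip (PySem.List.slice s (some 1) none)).foldl
      (fun d q => d.insert q (d.getD q 0 + 1)) (PySem.Dict.empty : PySem.Dict (Char × Char) Int)
  let pc := (PySem.List.pyRange 0 10 1).foldl (fun pc _ =>
      pc.items.foldl (fun npc pn =>
        let mid := match rules.get? [pn.1.1, pn.1.2] with
          | some ins => [pn.1.1] ++ ins ++ [pn.1.2]
          | none => [pn.1.1, pn.1.2]
        (mid.zip (PySem.List.slice mid (some 1) none)).foldl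
          (fun d q => d.insert q (d.getD q 0 + pn.2)) npc)
        (PySem.Dict.empty : PySem.Dict (Char × Char) Int)) pc0
  let cc1 := pc.items.foldl (fun d pn => d.insert pn.1.1 (d.getD pn.1.1 0 + pn.2))
      (PySem.Dict.empty : PySem.Dict Char Int)
  -- last = start[-1]; exact under Pre_ and under Raises_ (s nonempty; Python B raises IndexError on "")
  let last := PySem.List.pyGetD s (-1) ' '
  let cc := cc1.insert last (cc1.getD last 0 + 1)
  ((PySem.List.max? cc.values (fun x => x)).getD 0)
    - ((PySem.List.min? cc.values (fun x => x)).getD 0)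

-- ===== PRECONDITION & SPEC =====
-- Pre_ excludes exactly the start strings of length < 2, on which A raises IndexError
-- (chunks[-1] on the empty chunk list); A returns normally on every other input.
-- (On a one-character start string B's own algorithm returns 0 instead of raising;
-- on the empty string both programs raise IndexError.)
def Pre_part_one (puzzle : String × (List (String × String))) : Prop :=
  2 ≤ puzzle.1.toList.length
instance (puzzle : String × (List (String × String))) : Decidable (Pre_part_one puzzle) := by
  unfold Pre_part_one; infer_instance

def pvWitness_part_one : (String × (List (String × String))) := ("NNCB", [("NN", "C"), ("NC", "B")])

def Spec_part_one (puzzle : String × (List (String × String))) (out : Int) : Prop := out = part_one_alt puzzle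
instance (puzzle : String × (List (String × String))) (out : Int) : Decidable (Spec_part_one puzzle out) := by unfold Spec_part_one; infer_instance

-- ===== CLAIM (what is proved, stated in full; the proofs are below) =====
def Claim_equal_part_one : Prop := ∀ (puzzle : String × (List (String × String))), Dom_part_one puzzle → Pre_part_one puzzle → Spec_part_one puzzle (part_one puzzle)
-- ===== LEMMAS AND PROOFS =====

-- ---- proof-side model: adjacent pairs and the one-step expansion ----
def pvPairs : List Char → List (Char × Char)
  | a :: b :: t => (a, b) :: pvPairs (b :: t)
  | _ => []

def pvExpandMid (rules : PySem.Dict (List Char) (List Char)) (a b : Char) : List Char :=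
  match rules.get? [a, b] with
  | some ins => [a] ++ ins ++ [b]
  | none => [a, b]

def pvMid (rules : PySem.Dict (List Char) (List Char)) (a b : Char) : List Char :=
  (rules.get? [a, b]).getD []

def pvStepM (rules : PySem.Dict (List Char) (List Char)) (s : List Char) : List Char :=
  ((pvPairs s).map (fun p => (pvExpandMid rules p.1 p.2).dropLast)).flatten ++ [s.getLastD ' ']

-- ---- basic toolkit ----
theorem pvPairs_eq_zip (s : List Char) : pvPairs s = s.zip s.tail := by
  induction s with
  | nil => rfl
  | cons a t ih =>
    cases t with
    | nil => rfl
    | cons b t' => simp [pvPairs, ih]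

theorem pvGetLastD_irrel {α : Type} (l : List α) (h : l ≠ []) (d d' : α) :
    l.getLastD d = l.getLastD d' := by
  cases hl : l.getLast? with
  | none => exact absurd (List.getLast?_eq_none_iff.mp hl) h
  | some x => simp [List.getLastD_eq_getLast?, hl]

theorem pvPairs_glue (u : List Char) (c : Char) (v : List Char) :
    pvPairs (u ++ c :: v) = pvPairs (u ++ [c]) ++ pvPairs (c :: v) := by
  induction u with
  | nil => simp [pvPairs]
  | cons a u0 ih =>
    cases u0 with
    | nil => simp [pvPairs]
    | cons x u1 =>
      simp only [List.cons_append, pvPairs] at *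
      rw [ih]

theorem pvPairs_ne_nil (s : List Char) (h : 2 ≤ s.length) : pvPairs s ≠ [] := by
  match s, h with
  | a :: b :: t, _ => simp [pvPairs]

theorem pvPairs_lastD_snd (t : List Char) (a b : Char) (pd : Char × Char) :
    ((pvPairs (a :: b :: t)).getLastD pd).2 = (a :: b :: t).getLastD ' ' := by
  induction t generalizing a b pd with
  | nil => simp [pvPairs]
  | cons c t' ih =>
    have h1 : pvPairs (a :: b :: c :: t') = (a, b) :: pvPairs (b :: c :: t') := rfl
    rw [h1, List.getLastD_cons, ih b c (a, b), List.getLastD_cons]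
    exact pvGetLastD_irrel (b :: c :: t') (by simp) ' ' a

theorem pvExpand_shape (rules : PySem.Dict (List Char) (List Char)) (a b : Char) :
    pvExpandMid rules a b = a :: pvMid rules a b ++ [b] := by
  cases h : rules.get? [a, b] <;> simp [pvExpandMid, pvMid, h]

theorem pvExpand_dropLast (rules : PySem.Dict (List Char) (List Char)) (a b : Char) :
    (pvExpandMid rules a b).dropLast = a :: pvMid rules a b := by
  rw [pvExpand_shape]
  show ((a :: pvMid rules a b) ++ [b]).dropLast = a :: pvMid rules a b
  rw [List.dropLast_concat]

theorem pvExpand_getLastD (rules : PySem.Dict (List Char) (List Char)) (a b : Char) (d : Char) :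
    (pvExpandMid rules a b).getLastD d = b := by
  rw [pvExpand_shape]
  show ((a :: pvMid rules a b) ++ [b]).getLastD d = b
  rw [List.getLastD_eq_getLast?, List.getLast?_concat]
  rfl

theorem pvExpand_len (rules : PySem.Dict (List Char) (List Char)) (a b : Char) :
    2 ≤ (pvExpandMid rules a b).length := by
  rw [pvExpand_shape]
  simp

-- ---- structure of one modelled step ----
theorem pvStepM_two (rules : PySem.Dict (List Char) (List Char)) (a b : Char) :
    pvStepM rules [a, b] = pvExpandMid rules a b := by
  unfold pvStepM
  simp only [pvPairs, List.map_cons, List.map_nil, List.flatten_cons, List.flatten_nil,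
    List.append_nil, List.getLastD_cons]
  rw [pvExpand_dropLast, pvExpand_shape]
  simp

theorem pvStepM_cons (rules : PySem.Dict (List Char) (List Char)) (a b c : Char) (t : List Char) :
    pvStepM rules (a :: b :: c :: t)
      = (pvExpandMid rules a b).dropLast ++ pvStepM rules (b :: c :: t) := by
  unfold pvStepM
  have hl : (a :: b :: c :: t).getLastD ' ' = (b :: c :: t).getLastD ' ' := by
    rw [List.getLastD_cons]
    exact pvGetLastD_irrel _ (by simp) _ _
  rw [show pvPairs (a :: b :: c :: t) = (a, b) :: pvPairs (b :: c :: t) from rfl, hl]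
  simp [List.append_assoc]

theorem pvStepM_head (rules : PySem.Dict (List Char) (List Char)) (a b : Char) (t : List Char) :
    ∃ r, pvStepM rules (a :: b :: t) = a :: r := by
  cases t with
  | nil =>
    rw [pvStepM_two, pvExpand_shape]
    exact ⟨pvMid rules a b ++ [b], rfl⟩
  | cons c t' =>
    rw [pvStepM_cons, pvExpand_dropLast]
    exact ⟨pvMid rules a b ++ pvStepM rules (b :: c :: t'), rfl⟩

theorem pvPairs_stepM (rules : PySem.Dict (List Char) (List Char)) (t : List Char) (a b : Char) :
    pvPairs (pvStepM rules (a :: b :: t))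
      = (pvPairs (a :: b :: t)).flatMap (fun p => pvPairs (pvExpandMid rules p.1 p.2)) := by
  induction t generalizing a b with
  | nil =>
    rw [pvStepM_two]
    simp [pvPairs]
  | cons c t' ih =>
    rw [pvStepM_cons, pvExpand_dropLast]
    obtain ⟨r, hr⟩ := pvStepM_head rules b c t'
    rw [hr]
    rw [show (a :: pvMid rules a b) ++ (b :: r) = a :: pvMid rules a b ++ b :: r from rfl] at *
    rw [pvPairs_glue (a :: pvMid rules a b) b r]
    rw [show (a :: pvMid rules a b) ++ [b] = a :: pvMid rules a b ++ [b] from rfl]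
    rw [← pvExpand_shape, ← hr, ih]
    simp [pvPairs]

theorem pvStepM_lastD (rules : PySem.Dict (List Char) (List Char)) (s : List Char) (d : Char) :
    (pvStepM rules s).getLastD d = s.getLastD ' ' := by
  unfold pvStepM
  rw [List.getLastD_eq_getLast?, List.getLast?_concat]
  rfl

theorem pvStepM_len (rules : PySem.Dict (List Char) (List Char)) (t : List Char) (a b : Char) :
    2 ≤ (pvStepM rules (a :: b :: t)).length := by
  induction t generalizing a b with
  | nil =>
    rw [pvStepM_two]
    exact pvExpand_len rules a b
  | cons c t' ih =>
    rw [pvStepM_cons]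
    have h1 := ih b c
    simp only [List.length_append]
    omega

theorem pvPyGetD_lastD {α : Type} (xs : List α) (h : xs ≠ []) (d : α) :
    PySem.List.pyGetD xs (-1) d = xs.getLastD d := by
  rw [PySem.List.pyGetD_neg_one xs d h, List.getLastD_eq_getLast?,
    List.getLast?_eq_some_getLast h]
  rfl

theorem pvGetLastD_map {α β : Type} (f : α → β) (l : List α) (h : l ≠ []) (d : β) (pd : α) :
    (l.map f).getLastD d = f (l.getLastD pd) := by
  induction l generalizing pd with
  | nil => exact absurd rfl h
  | cons x l ih =>
    cases l with
    | nil => rfl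
    | cons y l' => simpa [List.getLastD_cons] using ih (by simp) y

-- ---- A's loop body equals the modelled step ----
theorem pvChunks_core (s : List Char) :
    (List.range (s.length - 1)).map (fun k => (s.drop k).take 2)
      = (pvPairs s).map (fun p => [p.1, p.2]) := by
  induction s with
  | nil => simp [pvPairs]
  | cons a t ih =>
    cases t with
    | nil => simp [pvPairs]
    | cons b t' =>
      have hl : (a :: b :: t').length - 1 = t'.length + 1 := by simp
      rw [hl, List.range_succ_eq_map, List.map_cons, List.map_map]
      have h2 : ((fun k => ((a :: b :: t').drop k).take 2) ∘ Nat.succ)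
          = (fun k => ((b :: t').drop k).take 2) := by
        funext k
        simp [List.drop_succ_cons]
      rw [h2]
      simp only [List.length_cons, Nat.add_sub_cancel] at ih
      simp [pvPairs, ih]

theorem pvBreak_eq (s : List Char) (h : 2 ≤ s.length) :
    pvBreakIntoChunks s = (pvPairs s).map (fun p => [p.1, p.2]) := by
  unfold pvBreakIntoChunks
  rw [PySem.List.foldl_append_singleton_eq_map]
  have h1 : ((s.length : Int) - 1) = (((s.length - 1 : Nat)) : Int) := by omega
  rw [List.nil_append, h1, PySem.List.pyRange_zero_natCast, List.map_map, ← pvChunks_core]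
  apply List.map_congr_left
  intro k _
  show PySem.List.slice s (some (k : Int)) (some ((k : Int) + 2)) = (s.drop k).take 2
  have h2 : ((k : Int) + 2) = ((k : Int) + ((2 : Nat) : Int)) := by norm_cast
  rw [h2, PySem.List.slice_natCast_add]

theorem pvStepA_eq (rules : PySem.Dict (List Char) (List Char)) (s : List Char) (h : 2 ≤ s.length) :
    pvMergeChunks ((pvBreakIntoChunks s).foldl (fun acc chunk =>
        match rules.get? chunk with
        | some ins => acc ++ [[PySem.List.pyGetD chunk 0 ' '] ++ ins ++ [PySem.List.pyGetD chunk 1 ' ']]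
        | none => acc ++ [chunk]) ([] : List (List Char)))
      = pvStepM rules s := by
  rw [pvBreak_eq _ h]
  have hfun : (fun (acc : List (List Char)) chunk =>
      match rules.get? chunk with
      | some ins => acc ++ [[PySem.List.pyGetD chunk 0 ' '] ++ ins ++ [PySem.List.pyGetD chunk 1 ' ']]
      | none => acc ++ [chunk])
    = (fun acc chunk => acc ++ [match rules.get? chunk with
      | some ins => [PySem.List.pyGetD chunk 0 ' '] ++ ins ++ [PySem.List.pyGetD chunk 1 ' ']
      | none => chunk]) := by
    funext acc chunk
    cases rules.get? chunk <;> rfl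
  rw [hfun, PySem.List.foldl_append_singleton_eq_map, List.nil_append, List.map_map]
  have hexp : ((fun chunk => match rules.get? chunk with
      | some ins => [PySem.List.pyGetD chunk 0 ' '] ++ ins ++ [PySem.List.pyGetD chunk 1 ' ']
      | none => chunk) ∘ (fun p : Char × Char => [p.1, p.2]))
      = fun p : Char × Char => pvExpandMid rules p.1 p.2 := by
    funext p
    show (match rules.get? [p.1, p.2] with
      | some ins => [PySem.List.pyGetD [p.1, p.2] 0 ' '] ++ ins ++ [PySem.List.pyGetD [p.1, p.2] 1 ' ']
      | none => [p.1, p.2]) = pvExpandMid rules p.1 p.2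
    cases hg : rules.get? [p.1, p.2] <;> simp [pvExpandMid, hg] <;> rfl
  rw [hexp]
  -- merge the expanded chunks
  obtain ⟨a, b, t, rfl⟩ : ∃ a b t, s = a :: b :: t := by
    match s, h with
    | a :: b :: t, _ => exact ⟨a, b, t, rfl⟩
  unfold pvMergeChunks pvStepM
  have hpne : pvPairs (a :: b :: t) ≠ [] := pvPairs_ne_nil _ h
  have hne : (pvPairs (a :: b :: t)).map (fun p => pvExpandMid rules p.1 p.2) ≠ [] := by
    simpa using hpne
  rw [List.flatten_append]
  congr 1
  · rw [List.map_map]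
    apply congrArg List.flatten
    apply List.map_congr_left
    intro p _
    show PySem.List.slice (pvExpandMid rules p.1 p.2) none (some (-1)) = (pvExpandMid rules p.1 p.2).dropLast
    rw [PySem.List.slice_to_neg_one]
  · rw [List.flatten_cons, List.flatten_nil, List.append_nil]
    rw [pvPyGetD_lastD _ hne []]
    rw [pvGetLastD_map _ _ hpne [] (a, b)]
    rw [pvPyGetD_lastD _ (by rw [pvExpand_shape]; simp) ' ']
    rw [pvExpand_getLastD]
    rw [pvPairs_lastD_snd t a b (a, b)]

-- ---- B's dictionary folds ----
theorem pvInner_getD (m : List (Char × Char)) (n : Int) (d : PySem.Dict (Char × Char) Int) (q : Char × Char) :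
    ((m.foldl (fun d q' => d.insert q' (d.getD q' 0 + n)) d).getD q 0)
      = d.getD q 0 + n * (m.count q : Int) := by
  induction m generalizing d with
  | nil => simp
  | cons q0 m ih =>
    rw [List.foldl_cons, ih, PySem.Dict.getD_insert]
    by_cases hq : q = q0
    · subst hq
      simp
      push_cast
      ring
    · simp [hq, Ne.symm hq]

theorem pvInner_mem (m : List (Char × Char)) (n : Int) (d : PySem.Dict (Char × Char) Int) (q : Char × Char) :
    q ∈ (m.foldl (fun d q' => d.insert q' (d.getD q' 0 + n)) d).keys ↔ q ∈ d.keys ∨ q ∈ m := by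
  induction m generalizing d with
  | nil => simp
  | cons q0 m ih =>
    rw [List.foldl_cons, ih]
    simp only [PySem.Dict.mem_keys_insert, List.mem_cons]
    tauto

theorem pvOuter_getD (g : (Char × Char) → List (Char × Char)) (l : List ((Char × Char) × Int))
    (d0 : PySem.Dict (Char × Char) Int) (q : Char × Char) :
    ((l.foldl (fun npc pn => (g pn.1).foldl (fun d q' => d.insert q' (d.getD q' 0 + pn.2)) npc) d0).getD q 0)
      = d0.getD q 0 + (l.map (fun pn => pn.2 * ((g pn.1).count q : Int))).sum := by
  induction l generalizing d0 with
  | nil => simp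
  | cons pn l ih =>
    rw [List.foldl_cons, ih, pvInner_getD]
    simp only [List.map_cons, List.sum_cons]
    ring

theorem pvOuter_mem (g : (Char × Char) → List (Char × Char)) (l : List ((Char × Char) × Int))
    (d0 : PySem.Dict (Char × Char) Int) (q : Char × Char) :
    q ∈ (l.foldl (fun npc pn => (g pn.1).foldl (fun d q' => d.insert q' (d.getD q' 0 + pn.2)) npc) d0).keys
      ↔ q ∈ d0.keys ∨ ∃ pn ∈ l, q ∈ g pn.1 := by
  induction l generalizing d0 with
  | nil => simp
  | cons pn l ih =>
    rw [List.foldl_cons, ih, pvInner_mem]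
    simp only [List.mem_cons]
    constructor
    · rintro (⟨hd | hg⟩ | ⟨pn', hpn', hq⟩)
      · exact Or.inl hd
      · exact Or.inr ⟨pn, Or.inl rfl, hg⟩
      · exact Or.inr ⟨pn', Or.inr hpn', hq⟩
    · rintro (hd | ⟨pn', hpn' | hpn', hq⟩)
      · exact Or.inl (Or.inl hd)
      · subst hpn'; exact Or.inl (Or.inr hq)
      · exact Or.inr ⟨pn', hpn', hq⟩

theorem pvOuter_nodup (g : (Char × Char) → List (Char × Char)) (l : List ((Char × Char) × Int))
    (d0 : PySem.Dict (Char × Char) Int) (h : d0.keys.Nodup) :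
    (l.foldl (fun npc pn => (g pn.1).foldl (fun d q' => d.insert q' (d.getD q' 0 + pn.2)) npc) d0).keys.Nodup := by
  induction l generalizing d0 with
  | nil => exact h
  | cons pn l ih =>
    rw [List.foldl_cons]
    exact ih _ (PySem.Dict.nodup_keys_foldl_insert _ _ _ h)

theorem pvCC_getD (l : List ((Char × Char) × Int)) (d0 : PySem.Dict Char Int) (c : Char) :
    ((l.foldl (fun d pn => d.insert pn.1.1 (d.getD pn.1.1 0 + pn.2)) d0).getD c 0)
      = d0.getD c 0 + (l.map (fun pn => if pn.1.1 = c then pn.2 else 0)).sum := by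
  induction l generalizing d0 with
  | nil => simp
  | cons pn l ih =>
    rw [List.foldl_cons, ih, PySem.Dict.getD_insert]
    by_cases hc : pn.1.1 = c
    · simp [hc]; ring
    · simp [hc, Ne.symm hc]

theorem pvCC_mem (l : List ((Char × Char) × Int)) (d0 : PySem.Dict Char Int) (c : Char) :
    c ∈ (l.foldl (fun d pn => d.insert pn.1.1 (d.getD pn.1.1 0 + pn.2)) d0).keys
      ↔ c ∈ d0.keys ∨ ∃ pn ∈ l, pn.1.1 = c := by
  induction l generalizing d0 with
  | nil => simp
  | cons pn l ih =>
    rw [List.foldl_cons, ih]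
    simp only [PySem.Dict.mem_keys_insert, List.mem_cons]
    constructor
    · rintro (⟨hd | hd⟩ | ⟨pn', hpn', hq⟩)
      · exact Or.inr ⟨pn, Or.inl rfl, hd.symm⟩
      · exact Or.inl hd
      · exact Or.inr ⟨pn', Or.inr hpn', hq⟩
    · rintro (hd | ⟨pn', hpn' | hpn', hq⟩)
      · exact Or.inl (Or.inr hd)
      · subst hpn'; exact Or.inl (Or.inl hq.symm)
      · exact Or.inr ⟨pn', hpn', hq⟩

-- ---- counting characters from pairs ----
theorem pvCount_char (s : List Char) (h : 1 ≤ s.length) (c : Char) :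
    s.count c = (pvPairs s).countP (fun p => decide (p.1 = c))
      + (if s.getLastD ' ' = c then 1 else 0) := by
  induction s with
  | nil => simp at h
  | cons a t ih =>
    cases t with
    | nil =>
      rw [show pvPairs [a] = [] from rfl]
      by_cases hc : a = c
      · subst hc
        simp
      · simp [hc]
    | cons b t' =>
      have ih' := ih (by simp) 
      have hlast : (a :: b :: t').getLastD ' ' = (b :: t').getLastD ' ' := by
        rw [List.getLastD_cons]
        exact pvGetLastD_irrel _ (by simp) _ _
      rw [show pvPairs (a :: b :: t') = (a, b) :: pvPairs (b :: t') from rfl]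
      rw [List.countP_cons, List.count_cons, hlast, ih']
      by_cases hc : a = c
      · subst hc
        simp
        omega
      · simp [hc]

theorem pvMem_char (s : List Char) (h : 1 ≤ s.length) (c : Char) :
    c ∈ s ↔ (∃ p ∈ pvPairs s, p.1 = c) ∨ s.getLastD ' ' = c := by
  induction s with
  | nil => simp at h
  | cons a t ih =>
    cases t with
    | nil => simp [pvPairs, eq_comm]
    | cons b t' =>
      have ih' := ih (by simp)
      have hlast : (a :: b :: t').getLastD ' ' = (b :: t').getLastD ' ' := by
        rw [List.getLastD_cons]
        exact pvGetLastD_irrel _ (by simp) _ _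
      rw [show pvPairs (a :: b :: t') = (a, b) :: pvPairs (b :: t') from rfl]
      rw [hlast]
      constructor
      · intro hm
        rcases List.mem_cons.mp hm with hc | hm2
        · exact Or.inl ⟨(a, b), by simp, hc.symm⟩
        · rcases ih'.mp hm2 with (⟨p, hp, hpc⟩ | hl)
          · exact Or.inl ⟨p, List.mem_cons_of_mem _ hp, hpc⟩
          · exact Or.inr hl
      · rintro (⟨p, hp, hpc⟩ | hl)
        · rcases List.mem_cons.mp hp with hp1 | hp2
          · subst hp1
            exact List.mem_cons.mpr (Or.inl hpc.symm)
          · exact List.mem_cons.mpr (Or.inr (ih'.mpr (Or.inl ⟨p, hp2, hpc⟩)))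
        · exact List.mem_cons.mpr (Or.inr (ih'.mpr (Or.inr hl)))

-- ---- summation over distinct keys ----
theorem pvBeq_eq {α : Type} [DecidableEq α] {i : BEq α} (hl : @LawfulBEq α i) (x p : α) :
    @BEq.beq α i x p = decide (x = p) := by
  by_cases hx : x = p
  · subst hx
    simp
  · have hb : ¬ (@BEq.beq α i x p = true) := fun hc => hx (hl.eq_of_beq hc)
    simp [hx, hb]

theorem pvCount_inst {α : Type} [DecidableEq α] {i1 i2 : BEq α}
    (h1 : @LawfulBEq α i1) (h2 : @LawfulBEq α i2) (x : α) (P : List α) :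
    @List.count α i1 x P = @List.count α i2 x P := by
  induction P with
  | nil => rfl
  | cons p P ih =>
    rw [@List.count_cons α i1, @List.count_cons α i2, ih, pvBeq_eq h1, pvBeq_eq h2]

theorem pvSum_keys (K P : List (Char × Char)) (f : (Char × Char) → Int)
    (hn : K.Nodup) (hm : ∀ q, q ∈ K ↔ q ∈ P) :
    (K.map (fun p => (P.count p : Int) * f p)).sum = (P.map f).sum := by
  have hfin : K.toFinset = P.toFinset := by
    ext x
    simp [hm x]
  rw [← List.sum_toFinset _ hn, hfin, Finset.sum_list_map_count]
  apply Finset.sum_congr rfl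
  intro x _
  rw [nsmul_eq_mul,
    pvCount_inst (i1 := instBEqOfDecidableEq) (by infer_instance) (by infer_instance) x P]

-- ---- extrema only depend on membership ----
theorem pvMax_congr (v1 v2 : List Int) (h : ∀ x, x ∈ v1 ↔ x ∈ v2) :
    PySem.List.max? v1 (fun x => x) = PySem.List.max? v2 (fun x => x) := by
  cases h1 : PySem.List.max? v1 (fun x => x) with
  | none =>
    cases h2 : PySem.List.max? v2 (fun x => x) with
    | none => rfl
    | some m =>
      have hm := PySem.List.max?_mem h2
      rw [(PySem.List.max?_eq_none_iff v1 _).mp h1] at h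
      exact absurd ((h m).mpr hm) (by simp)
  | some m =>
    cases h2 : PySem.List.max? v2 (fun x => x) with
    | none =>
      have hm := PySem.List.max?_mem h1
      rw [(PySem.List.max?_eq_none_iff v2 _).mp h2] at h
      exact absurd ((h m).mp hm) (by simp)
    | some m2 =>
      have hm1 := PySem.List.max?_mem h1
      have hm2 := PySem.List.max?_mem h2
      have hle1 := PySem.List.max?_isMax h2 m ((h m).mp hm1)
      have hle2 := PySem.List.max?_isMax h1 m2 ((h m2).mpr hm2)
      simp only [Option.some.injEq]
      omega

theorem pvMin_congr (v1 v2 : List Int) (h : ∀ x, x ∈ v1 ↔ x ∈ v2) :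
    PySem.List.min? v1 (fun x => x) = PySem.List.min? v2 (fun x => x) := by
  cases h1 : PySem.List.min? v1 (fun x => x) with
  | none =>
    cases h2 : PySem.List.min? v2 (fun x => x) with
    | none => rfl
    | some m =>
      have hm := PySem.List.min?_mem h2
      rw [(PySem.List.min?_eq_none_iff v1 _).mp h1] at h
      exact absurd ((h m).mpr hm) (by simp)
  | some m =>
    cases h2 : PySem.List.min? v2 (fun x => x) with
    | none =>
      have hm := PySem.List.min?_mem h1
      rw [(PySem.List.min?_eq_none_iff v2 _).mp h2] at h
      exact absurd ((h m).mp hm) (by simp)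
    | some m2 =>
      have hm1 := PySem.List.min?_mem h1
      have hm2 := PySem.List.min?_mem h2
      have hle1 := PySem.List.min?_isMin h2 m ((h m).mp hm1)
      have hle2 := PySem.List.min?_isMin h1 m2 ((h m2).mpr hm2)
      simp only [Option.some.injEq]
      omega

-- ---- the loop invariant ----
def pvR (z : Char) (s : List Char) (pc : PySem.Dict (Char × Char) Int) : Prop :=
  2 ≤ s.length ∧ s.getLastD ' ' = z ∧ pc.keys.Nodup ∧
    (∀ q, q ∈ pc.keys ↔ q ∈ pvPairs s) ∧
    (∀ q, pc.getD q 0 = (List.count q (pvPairs s) : Int))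

theorem pvFoldRel {α β : Type} (R : α → β → Prop) (f : α → Int → α) (g : β → Int → β)
    (h : ∀ (a : α) (b : β) (i : Int), R a b → R (f a i) (g b i)) :
    ∀ (l : List Int) (a : α) (b : β), R a b → R (l.foldl f a) (l.foldl g b) := by
  intro l
  induction l with
  | nil => intro a b hr; exact hr
  | cons x l ih => intro a b hr; exact ih _ _ (h a b x hr)

theorem pvStep_preserves (rules : PySem.Dict (List Char) (List Char)) (z : Char)
    (s : List Char) (pc : PySem.Dict (Char × Char) Int) (h : pvR z s pc) :
    pvR z (pvStepM rules s)
      (pc.items.foldl (fun npc pn =>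
        (pvPairs (pvExpandMid rules pn.1.1 pn.1.2)).foldl
          (fun d q' => d.insert q' (d.getD q' 0 + pn.2)) npc)
        (PySem.Dict.empty : PySem.Dict (Char × Char) Int)) := by
  obtain ⟨hlen, hlast, hnd, hmem, hgetD⟩ := h
  obtain ⟨a, b, t, rfl⟩ : ∃ a b t, s = a :: b :: t := by
    match s, hlen with
    | a :: b :: t, _ => exact ⟨a, b, t, rfl⟩
  have hitems : pc.items = pc.keys.map (fun k => (k, pc.getD k 0)) :=
    PySem.Dict.items_eq_map_keys pc hnd 0
  refine ⟨pvStepM_len rules t a b, by rw [pvStepM_lastD]; exact hlast, ?_, ?_, ?_⟩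
  · exact pvOuter_nodup (fun p => pvPairs (pvExpandMid rules p.1 p.2)) pc.items _
      (by rw [PySem.Dict.keys_empty]; exact List.nodup_nil)
  · intro q
    rw [pvOuter_mem (fun p => pvPairs (pvExpandMid rules p.1 p.2)) pc.items _ q]
    rw [pvPairs_stepM]
    simp only [List.mem_flatMap, PySem.Dict.keys_empty, List.not_mem_nil, false_or]
    constructor
    · rintro ⟨pn, hpn, hq⟩
      exact ⟨pn.1, (hmem pn.1).mp (PySem.Dict.mem_keys_of_mem_items pc hpn), hq⟩
    · rintro ⟨p, hp, hq⟩
      have hpk : p ∈ pc.keys := (hmem p).mpr hp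
      refine ⟨(p, pc.getD p 0), ?_, hq⟩
      rw [hitems]
      exact List.mem_map_of_mem hpk
  · intro q
    rw [pvOuter_getD (fun p => pvPairs (pvExpandMid rules p.1 p.2)) pc.items _ q]
    rw [PySem.Dict.getD_empty, hitems, List.map_map]
    have hcongr : (pc.keys.map ((fun pn : (Char × Char) × Int =>
          pn.2 * (((pvPairs (pvExpandMid rules pn.1.1 pn.1.2)).count q : Nat) : Int))
          ∘ (fun k => (k, pc.getD k 0)))).sum
        = (pc.keys.map (fun p => ((List.count p (pvPairs (a :: b :: t)) : Nat) : Int)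
            * (((pvPairs (pvExpandMid rules p.1 p.2)).count q : Nat) : Int))).sum := by
      apply congrArg
      apply List.map_congr_left
      intro k _
      simp only [Function.comp]
      rw [hgetD k]
    rw [hcongr,
      pvSum_keys pc.keys (pvPairs (a :: b :: t))
        (fun p => (((pvPairs (pvExpandMid rules p.1 p.2)).count q : Nat) : Int)) hnd hmem]
    rw [pvPairs_stepM]
    rw [List.count_eq_countP, List.countP_flatMap]
    rw [zero_add]
    rw [Nat.cast_list_sum, List.map_map]
    apply congrArg
    apply List.map_congr_left
    intro p _
    simp only [Function.comp]
    rw [List.count_eq_countP]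


-- ---- deriving both final answers from the invariant ----
theorem pvFinal (z : Char) (SA : List Char) (SB : PySem.Dict (Char × Char) Int)
    (h : pvR z SA SB) :
    ((PySem.List.max? (SA.foldl (fun d ch => d.modify ch 0 (· + 1)) PySem.Dict.empty).values (fun x => x)).getD 0)
      - ((PySem.List.min? (SA.foldl (fun d ch => d.modify ch 0 (· + 1)) PySem.Dict.empty).values (fun x => x)).getD 0)
    = ((PySem.List.max? ((SB.items.foldl (fun d pn => d.insert pn.1.1 (d.getD pn.1.1 0 + pn.2)) PySem.Dict.empty).insert z
          ((SB.items.foldl (fun d pn => d.insert pn.1.1 (d.getD pn.1.1 0 + pn.2)) PySem.Dict.empty).getD z 0 + 1)).values (fun x => x)).getD 0)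
      - ((PySem.List.min? ((SB.items.foldl (fun d pn => d.insert pn.1.1 (d.getD pn.1.1 0 + pn.2)) PySem.Dict.empty).insert z
          ((SB.items.foldl (fun d pn => d.insert pn.1.1 (d.getD pn.1.1 0 + pn.2)) PySem.Dict.empty).getD z 0 + 1)).values (fun x => x)).getD 0) := by
  obtain ⟨hlen, hlast, hnd, hmem, hget⟩ := h
  set cc1 := SB.items.foldl (fun d pn => d.insert pn.1.1 (d.getD pn.1.1 0 + pn.2)) PySem.Dict.empty with hcc1def
  have hitems : SB.items = SB.keys.map (fun k => (k, SB.getD k 0)) := PySem.Dict.items_eq_map_keys SB hnd 0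
  have hcc1get : ∀ c, cc1.getD c 0 = ((pvPairs SA).countP (fun p => decide (p.1 = c)) : Int) := by
    intro c
    rw [hcc1def, pvCC_getD, PySem.Dict.getD_empty, zero_add, hitems, List.map_map]
    have hstep1 : (SB.keys.map ((fun pn : (Char × Char) × Int => if pn.1.1 = c then pn.2 else 0)
        ∘ (fun k => (k, SB.getD k 0)))).sum
        = (SB.keys.map (fun p => ((pvPairs SA).count p : Int) * (if p.1 = c then 1 else 0))).sum := by
      apply congrArg
      apply List.map_congr_left
      intro k _
      simp only [Function.comp]
      rw [hget k]
      by_cases hk : k.1 = c <;> simp [hk]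
    rw [hstep1, pvSum_keys SB.keys (pvPairs SA) _ hnd hmem]
    have hstep2 : (fun p : Char × Char => if p.1 = c then (1 : Int) else 0)
        = (fun p : Char × Char => if (fun x : Char × Char => decide (x.1 = c)) p = true then (1 : Int) else 0) := by
      funext p
      simp
    rw [hstep2, PySem.List.sum_map_ite_one_zero]
  have hcc1nd : cc1.keys.Nodup := by
    rw [hcc1def]
    exact PySem.Dict.nodup_keys_foldl_insert_key _ _ _ _
      (by rw [PySem.Dict.keys_empty]; exact List.nodup_nil)
  set cc := cc1.insert z (cc1.getD z 0 + 1) with hccdef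
  have hccnd : cc.keys.Nodup := PySem.Dict.nodup_keys_insert _ _ _ hcc1nd
  have hccget : ∀ c, cc.getD c 0 = (SA.count c : Int) := by
    intro c
    rw [hccdef, PySem.Dict.getD_insert, pvCount_char SA (by omega) c, hlast]
    by_cases hc : c = z
    · subst hc
      rw [if_pos rfl, hcc1get]
      simp
    · rw [if_neg hc, hcc1get]
      have hzc : ¬ (z = c) := fun hzc => hc hzc.symm
      simp [hzc]
  have hccmem : ∀ c, c ∈ cc.keys ↔ c ∈ SA := by
    intro c
    rw [hccdef, PySem.Dict.mem_keys_insert, hcc1def, pvCC_mem,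
      pvMem_char SA (by omega) c, hlast]
    simp only [PySem.Dict.keys_empty, List.not_mem_nil, false_or]
    constructor
    · rintro (hc | ⟨pn, hpn, hq⟩)
      · exact Or.inr hc.symm
      · exact Or.inl ⟨pn.1, (hmem pn.1).mp (PySem.Dict.mem_keys_of_mem_items SB hpn), hq⟩
    · rintro (⟨p, hp, hq⟩ | hl)
      · refine Or.inr ⟨(p, SB.getD p 0), ?_, hq⟩
        rw [hitems]
        exact List.mem_map_of_mem ((hmem p).mpr hp)
      · exact Or.inl hl.symm
  rw [← PySem.Dict.counter_eq_foldl,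
    PySem.Dict.values_eq_map_keys _ (PySem.Dict.nodup_keys_counter SA) 0,
    PySem.Dict.keys_counter]
  have hAv : (PySem.Set.ofList SA).map (fun k => (PySem.Dict.counter SA).getD k 0)
      = (PySem.Set.ofList SA).map (fun k => (SA.count k : Int)) := by
    apply List.map_congr_left
    intro k _
    rw [PySem.Dict.getD_counter]
  rw [hAv, PySem.Dict.values_eq_map_keys cc hccnd 0]
  have hBv : cc.keys.map (fun k => cc.getD k 0) = cc.keys.map (fun k => (SA.count k : Int)) := by
    apply List.map_congr_left
    intro k _
    rw [hccget]
  rw [hBv]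
  have hmm : ∀ x, x ∈ (PySem.Set.ofList SA).map (fun k => (SA.count k : Int))
      ↔ x ∈ cc.keys.map (fun k => (SA.count k : Int)) := by
    intro x
    simp only [List.mem_map, PySem.Set.mem_ofList, hccmem]
  rw [pvMax_congr _ _ hmm, pvMin_congr _ _ hmm]

-- ===== VERDICT (by name: the statement is the Claim_ definition above) =====
theorem part_one_spec : Claim_equal_part_one := by
  intro puzzle _ hpre
  unfold Pre_part_one at hpre
  unfold Spec_part_one
  simp only [part_one, part_one_alt]
  set rules : PySem.Dict (List Char) (List Char) :=
    PySem.Dict.mk (List.map (fun p => (p.1.toList, p.2.toList)) puzzle.2) with hrules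
  set s0 : List Char := puzzle.1.toList with hs0
  have hs0ne : s0 ≠ [] := by
    intro h0
    rw [h0] at hpre
    simp at hpre
  have hgfun : (fun (npc : PySem.Dict (Char × Char) Int) (pn : (Char × Char) × Int) =>
      ((match rules.get? [pn.1.1, pn.1.2] with
        | some ins => [pn.1.1] ++ ins ++ [pn.1.2]
        | none => [pn.1.1, pn.1.2]).zip
        (PySem.List.slice (match rules.get? [pn.1.1, pn.1.2] with
          | some ins => [pn.1.1] ++ ins ++ [pn.1.2]
          | none => [pn.1.1, pn.1.2]) (some 1) none)).foldl
        (fun d q => d.insert q (d.getD q 0 + pn.2)) npc)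
      = (fun npc pn => (pvPairs (pvExpandMid rules pn.1.1 pn.1.2)).foldl
          (fun d q => d.insert q (d.getD q 0 + pn.2)) npc) := by
    funext npc pn
    show ((pvExpandMid rules pn.1.1 pn.1.2).zip
        (PySem.List.slice (pvExpandMid rules pn.1.1 pn.1.2) (some 1) none)).foldl
        (fun d q => d.insert q (d.getD q 0 + pn.2)) npc = _
    rw [PySem.List.slice_from_one, ← pvPairs_eq_zip]
  rw [hgfun]
  have h0 : pvR (s0.getLastD ' ') s0
      ((s0.zip (PySem.List.slice s0 (some 1) none)).foldl
        (fun d q => d.insert q (d.getD q 0 + 1)) PySem.Dict.empty) := by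
    rw [PySem.List.slice_from_one, ← pvPairs_eq_zip]
    refine ⟨hpre, rfl, ?_, ?_, ?_⟩
    · exact PySem.Dict.nodup_keys_foldl_insert _ _ _
        (by rw [PySem.Dict.keys_empty]; exact List.nodup_nil)
    · intro q
      rw [pvInner_mem (pvPairs s0) 1 PySem.Dict.empty q]
      simp [PySem.Dict.keys_empty]
    · intro q
      rw [PySem.Dict.getD_foldl_insert_add_one, PySem.Dict.getD_empty, zero_add]
  have hfin := pvFoldRel (pvR (s0.getLastD ' '))
      (fun start_str _ => pvMergeChunks ((pvBreakIntoChunks start_str).foldl (fun acc chunk =>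
          match rules.get? chunk with
          | some ins => acc ++ [[PySem.List.pyGetD chunk 0 ' '] ++ ins ++ [PySem.List.pyGetD chunk 1 ' ']]
          | none => acc ++ [chunk]) []))
      (fun pc _ => pc.items.foldl (fun npc pn =>
          (pvPairs (pvExpandMid rules pn.1.1 pn.1.2)).foldl
            (fun d q => d.insert q (d.getD q 0 + pn.2)) npc) PySem.Dict.empty)
      (fun s pc i hr => by
        show pvR (s0.getLastD ' ')
          (pvMergeChunks ((pvBreakIntoChunks s).foldl (fun acc chunk =>
            match rules.get? chunk with
            | some ins => acc ++ [[PySem.List.pyGetD chunk 0 ' '] ++ ins ++ [PySem.List.pyGetD chunk 1 ' ']]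
            | none => acc ++ [chunk]) []))
          (pc.items.foldl (fun npc pn =>
            (pvPairs (pvExpandMid rules pn.1.1 pn.1.2)).foldl
              (fun d q => d.insert q (d.getD q 0 + pn.2)) npc) PySem.Dict.empty)
        rw [pvStepA_eq rules s hr.1]
        exact pvStep_preserves rules _ s pc hr)
      (PySem.List.pyRange 0 10 1) s0 _ h0
  rw [pvPyGetD_lastD s0 hs0ne ' ']
  exact pvFinal (s0.getLastD ' ') _ _ hfin
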